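-- pv_equiv track=rewrite | github.com/alvarosamp/MatchLLM | api/routes/edital_routes.py | _summarize_technical
-- ===== SOURCE A (Python) =====
-- def _summarize_technical(items: list[dict]) -> str:
--     """
--     Gera um resumo técnico simples a partir do resultado estruturado do match.
--     - Destina-se a produzir um parágrafo conciso por edital explicando quais requisitos
--       o produto atende ou não, e apontando lacunas técnicas.
--     """
--     if not items:
--         return "Nenhum requisito identificado no edital."
--     atendidos = [it for it in items if str(it.get("status", "")).upper() in {"ATENDE", "SIM"}]
--     nao_atendidos = [it for it in items if str(it.get("status", "")).upper() not in {"ATENDE", "SIM"}]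
--     parts = []
--     parts.append(f"Requisitos avaliados: {len(items)}; atende: {len(atendidos)}; não atende: {len(nao_atendidos)}.")
--     if atendidos:
--         # pega nomes e exemplos de justificativa
--         nomes = ", ".join(sorted({it.get("requisito") for it in atendidos if it.get("requisito")}))
--         if nomes:
--             parts.append(f"Principais requisitos atendidos: {nomes}.")
--     if nao_atendidos:
--         exemplos = []
--         for it in nao_atendidos[:5]:
--             req = it.get("requisito") or "(sem nome)"
--             motivo = it.get("justificativa") or it.get("comentario") or "sem justificativa"
--             exemplos.append(f"{req}: {motivo}")
--         parts.append("Exemplos de não conformidade: " + "; ".join(exemplos) + ".")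
--     return " ".join(parts)
-- ===== SOURCE B (Python) =====
-- def _summarize_technical(items: list[dict]) -> str:
--     # One streaming pass: counts, the set of attended requirement names, and the
--     # first five non-conformity examples are accumulated together; no intermediate
--     # atendidos/nao_atendidos lists are materialized.
--     if not items:
--         return "Nenhum requisito identificado no edital."
--     n_at = 0
--     n_nao = 0
--     nomes_set = set()
--     exemplos = []
--     for it in items:
--         if str(it.get("status", "")).upper() in ("ATENDE", "SIM"):
--             n_at += 1
--             req = it.get("requisito")
--             if req:
--                 nomes_set.add(req)
--         else:
--             n_nao += 1
--             if len(exemplos) < 5: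
--                 req = it.get("requisito") or "(sem nome)"
--                 motivo = it.get("justificativa") or it.get("comentario") or "sem justificativa"
--                 exemplos.append(f"{req}: {motivo}")
--     out = f"Requisitos avaliados: {len(items)}; atende: {n_at}; não atende: {n_nao}."
--     if nomes_set:
--         out += " Principais requisitos atendidos: " + ", ".join(sorted(nomes_set)) + "."
--     if exemplos:
--         out += " Exemplos de não conformidade: " + "; ".join(exemplos) + "."
--     return out
-- ===== Notes on version B (the rewrite author's own statement) =====
-- stated objective: alternative
-- what changed: A partitions items with two complementary list comprehensions and then re-walks the partitions (a sorted-set comprehension plus a sliced loop for the first five examples); B makes one streaming pass that accumulates both counts, the set of attended requirement names and the first five non-conformity example strings together, never materializing the atendidos/nao_atendidos lists.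
import Mathlib
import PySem

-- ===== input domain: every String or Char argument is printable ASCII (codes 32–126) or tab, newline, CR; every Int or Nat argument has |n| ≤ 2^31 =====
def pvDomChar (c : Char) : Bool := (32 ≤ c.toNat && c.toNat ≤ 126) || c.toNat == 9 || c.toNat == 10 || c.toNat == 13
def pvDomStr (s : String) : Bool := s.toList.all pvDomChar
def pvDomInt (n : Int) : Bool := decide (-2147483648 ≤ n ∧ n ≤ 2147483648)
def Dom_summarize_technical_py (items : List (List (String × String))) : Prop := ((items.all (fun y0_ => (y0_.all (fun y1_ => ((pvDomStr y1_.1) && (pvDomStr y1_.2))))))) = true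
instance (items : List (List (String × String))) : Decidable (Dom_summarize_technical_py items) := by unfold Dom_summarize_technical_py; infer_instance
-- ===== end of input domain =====

-- B replaces A's two complementary filtering comprehensions (plus a later slice/loop) by ONE
-- streaming pass that accumulates the counts, the set of attended requirement names and the
-- first five non-conformity example strings together (objective: alternative decomposition).

-- shared primitive helpers (dict.get, Python truthy `or`, the status test, one example line)
def pvGetS (it : List (String × String)) (k : String) : Option String :=
  match it with
  | [] => none
  | (k', v) :: r => if k' = k then some v else pvGetS r k

def pvOrS (o : Option String) (d : String) : String :=
  match o with
  | some s => if s = "" then d else s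
  | none => d

def pvStatusOk (it : List (String × String)) : Bool :=
  let s := PySem.Str.upper ((pvGetS it "status").getD "")
  s == "ATENDE" || s == "SIM"

def pvReqOf (it : List (String × String)) : Option String :=
  match pvGetS it "requisito" with
  | some s => if s = "" then none else some s
  | none => none

def pvExemplo (it : List (String × String)) : String :=
  pvOrS (pvGetS it "requisito") "(sem nome)" ++ ": " ++
    pvOrS (pvGetS it "justificativa") (pvOrS (pvGetS it "comentario") "sem justificativa")

-- ===== PORT A =====
def summarize_technical_py (items : List (List (String × String))) : String :=
  if items = [] then "Nenhum requisito identificado no edital."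
  else
    let atendidos := items.filter (fun it => pvStatusOk it)
    let nao_atendidos := items.filter (fun it => !(pvStatusOk it))
    let parts : List String :=
      ["Requisitos avaliados: " ++ PySem.Int.toStr (items.length : Int) ++ "; atende: " ++
        PySem.Int.toStr (atendidos.length : Int) ++ "; não atende: " ++
        PySem.Int.toStr (nao_atendidos.length : Int) ++ "."]
    let parts :=
      if atendidos ≠ [] then
        let nomes := PySem.Str.join ", "
          (PySem.List.sorted (PySem.Set.ofList (atendidos.filterMap pvReqOf)) (fun x => x) false)
        if nomes ≠ "" then parts ++ ["Principais requisitos atendidos: " ++ nomes ++ "."] else parts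
      else parts
    let parts :=
      if nao_atendidos ≠ [] then
        let exemplos := (PySem.List.slice nao_atendidos none (some 5)).foldl
          (fun acc it => acc ++ [pvExemplo it]) []
        parts ++ ["Exemplos de não conformidade: " ++ PySem.Str.join "; " exemplos ++ "."]
      else parts
    PySem.Str.join " " parts

-- ===== PORT B =====
def pvStepB (acc : Nat × PySem.Set String × List String × Nat)
    (it : List (String × String)) : Nat × PySem.Set String × List String × Nat :=
  let (nAt, nomes, exs, nNao) := acc
  if pvStatusOk it then
    (nAt + 1,
     (match pvGetS it "requisito" with
      | some s => if s = "" then nomes else PySem.Set.add nomes s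
      | none => nomes),
     exs, nNao)
  else
    (nAt, nomes, (if exs.length < 5 then exs ++ [pvExemplo it] else exs), nNao + 1)

def summarize_technical_py_alt (items : List (List (String × String))) : String :=
  if items = [] then "Nenhum requisito identificado no edital."
  else
    let st := items.foldl pvStepB (0, PySem.Set.empty, [], 0)
    let out := "Requisitos avaliados: " ++ PySem.Int.toStr (items.length : Int) ++ "; atende: " ++
      PySem.Int.toStr (st.1 : Int) ++ "; não atende: " ++ PySem.Int.toStr (st.2.2.2 : Int) ++ "."
    let out :=
      if st.2.1 ≠ [] then
        out ++ " Principais requisitos atendidos: " ++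
          PySem.Str.join ", " (PySem.List.sorted st.2.1 (fun x => x) false) ++ "."
      else out
    let out :=
      if st.2.2.1 ≠ [] then
        out ++ " Exemplos de não conformidade: " ++ PySem.Str.join "; " st.2.2.1 ++ "."
      else out
    out

-- ===== PRECONDITION & SPEC =====
def Spec_summarize_technical_py (items : List (List (String × String))) (out : String) : Prop := out = summarize_technical_py_alt items
instance (items : List (List (String × String))) (out : String) : Decidable (Spec_summarize_technical_py items out) := by unfold Spec_summarize_technical_py; infer_instance

-- ===== CLAIM (what is proved, stated in full; the proofs are below) =====
def Claim_equal_summarize_technical_py : Prop := ∀ (items : List (List (String × String))), Dom_summarize_technical_py items → Spec_summarize_technical_py items (summarize_technical_py items)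

-- ===== LEMMAS AND PROOFS =====

-- closed form of B's single accumulating pass
theorem loopB_spec (items : List (List (String × String)))
    (a : Nat) (b : PySem.Set String) (c : List String) (d : Nat) :
    items.foldl pvStepB (a, b, c, d) =
      (a + (items.filter (fun it => pvStatusOk it)).length,
       ((items.filter (fun it => pvStatusOk it)).filterMap pvReqOf).foldl PySem.Set.add b,
       c ++ ((items.filter (fun it => !(pvStatusOk it))).take (5 - c.length)).map pvExemplo,
       d + (items.filter (fun it => !(pvStatusOk it))).length) := by
  induction items generalizing a b c d with
  | nil => simp
  | cons it rest ih =>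
    by_cases h : pvStatusOk it
    · simp only [List.foldl_cons, pvStepB, h, if_pos, List.filter_cons_of_pos, ih]
      cases hg : pvGetS it "requisito" with
      | none => simp [pvReqOf, hg, h, List.filter_cons, Nat.add_comm, Nat.add_left_comm, Nat.add_assoc]
      | some s =>
        by_cases hs : s = "" <;>
          simp [pvReqOf, hg, hs, h, List.filter_cons, Nat.add_comm, Nat.add_left_comm, Nat.add_assoc]
    · simp only [List.foldl_cons, pvStepB, h, if_neg, Bool.not_eq_true, ih,
        List.filter_cons_of_neg, List.filter_cons_of_pos, Bool.not_eq_true']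
      by_cases hc : c.length < 5
      · have h5 : 5 - c.length = (5 - (c.length + 1)) + 1 := by omega
        simp only [h, if_neg, Bool.not_eq_true, List.filter_cons, Bool.not_true, ite_self,
          Bool.not_eq_true', if_pos, hc, if_true, Bool.not_false]
        simp [h, hc, h5, List.take_succ_cons, List.filter_cons, Nat.add_comm, Nat.add_left_comm,
          Nat.add_assoc, Nat.add_one_sub_one]
        rw [Nat.add_comm 1, List.take_succ_cons]
      · simp [hc, h, List.filter_cons, Nat.sub_eq_zero_of_le (by omega : 5 ≤ c.length),
          Nat.add_comm, Nat.add_left_comm, Nat.add_assoc]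

theorem join_ne_empty (sep x : String) (rest : List String) (hx : x ≠ "") :
    PySem.Str.join sep (x :: rest) ≠ "" := by
  intro h
  have h2 : (PySem.Str.join sep (x :: rest)).toList = "".toList := by rw [h]
  rw [PySem.Str.toList_join] at h2
  cases rest with
  | nil => simp [PySem.Chars.join_singleton] at h2; exact hx h2
  | cons y ys =>
    rw [List.map_cons, List.map_cons, PySem.Chars.join_cons_cons] at h2
    rw [show ("" : String).toList = [] from rfl] at h2
    simp only [List.append_assoc, List.append_eq_nil_iff, String.toList_eq_nil_iff] at h2
    exact hx h2.1

theorem join_one (x : String) : PySem.Str.join " " [x] = x := by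
  rw [← String.toList_inj]
  rw [PySem.Str.toList_join, List.map_cons, List.map_nil, PySem.Chars.join_singleton]

theorem join_two (h x : String) : PySem.Str.join " " [h, x] = h ++ (" " ++ x) := by
  rw [← String.toList_inj]
  rw [PySem.Str.toList_join, List.map_cons, List.map_cons, List.map_nil,
    PySem.Chars.join_cons_cons, PySem.Chars.join_singleton]
  simp

theorem join_three (h x y : String) :
    PySem.Str.join " " [h, x, y] = h ++ (" " ++ x) ++ (" " ++ y) := by
  rw [← String.toList_inj]
  rw [PySem.Str.toList_join, List.map_cons, List.map_cons, List.map_cons, List.map_nil,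
    PySem.Chars.join_cons_cons, PySem.Chars.join_cons_cons, PySem.Chars.join_singleton]
  simp

theorem reqOf_ne_empty (it : List (String × String)) (x : String) (h : pvReqOf it = some x) :
    x ≠ "" := by
  unfold pvReqOf at h
  cases hg : pvGetS it "requisito" with
  | none => simp [hg] at h
  | some s =>
    rw [hg] at h
    by_cases hs : s = "" <;> simp [hs] at h
    exact h ▸ hs

theorem summarize_technical_py_spec : Claim_equal_summarize_technical_py := by
  intro items _
  unfold Spec_summarize_technical_py
  by_cases hnil : items = []
  · simp [summarize_technical_py, summarize_technical_py_alt, hnil]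
  · simp only [summarize_technical_py, summarize_technical_py_alt, if_neg hnil, loopB_spec,
      Nat.zero_add, Nat.sub_zero, List.nil_append, List.length_nil]
    have hofl : ∀ xs : List String,
        List.foldl PySem.Set.add PySem.Set.empty xs = PySem.Set.ofList xs :=
      fun xs => (PySem.Set.ofList_eq_foldl xs).symm
    simp only [hofl]
    rw [show (PySem.List.slice (items.filter (fun it => !(pvStatusOk it))) none (some 5))
          = (items.filter (fun it => !(pvStatusOk it))).take 5 from by
      have := PySem.List.slice_to (xs := items.filter (fun it => !(pvStatusOk it)))
        (b := (5 : Int)) (by norm_num)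
      simpa using this]
    rw [PySem.List.foldl_append_singleton_eq_map]
    have lit1 : (" Principais requisitos atendidos: " : String)
        = " " ++ "Principais requisitos atendidos: " := rfl
    have lit2 : (" Exemplos de não conformidade: " : String)
        = " " ++ "Exemplos de não conformidade: " := rfl
    set Afl := items.filter (fun it => pvStatusOk it) with hAfl
    set N := items.filter (fun it => !(pvStatusOk it)) with hNdef
    set L := Afl.filterMap pvReqOf with hL
    by_cases hS : PySem.Set.ofList L = []
    · -- empty name set: neither side emits the attended-names part
      have hnomes : PySem.Str.join ", "
          (PySem.List.sorted ([] : List String) (fun x => x) false) = "" := rfl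
      by_cases hNn : N = []
      · simp [hS, hnomes, hNn, join_one]
      · simp only [hS, hnomes, hNn, ne_eq, not_true_eq_false, if_false, ite_self,
          not_false_eq_true, if_true, List.map_eq_nil_iff, List.take_eq_nil_iff,
          or_false, List.singleton_append, List.cons_append, List.nil_append,
          OfNat.ofNat_ne_zero, false_or]
        rw [join_two]
        simp only [String.append_assoc, lit2]
    · -- nonempty name set: both sides emit the same middle part
      have hLne : L ≠ [] := by intro h; apply hS; rw [h]; rfl
      have hAne : Afl ≠ [] := by
        intro h; apply hLne; rw [hL, h]; rfl
      have hnomes : PySem.Str.join ", "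
          (PySem.List.sorted (PySem.Set.ofList L) (fun x => x) false) ≠ "" := by
        cases hsor : PySem.List.sorted (PySem.Set.ofList L) (fun x => x) false with
        | nil => exact absurd ((PySem.List.sorted_eq_nil_iff _ _ _).mp hsor) hS
        | cons x t =>
          apply join_ne_empty
          have hxmem : x ∈ PySem.List.sorted (PySem.Set.ofList L) (fun x => x) false := by
            rw [hsor]; simp
          rw [PySem.List.mem_sorted, PySem.Set.mem_ofList] at hxmem
          obtain ⟨it, _, hit⟩ := List.mem_filterMap.mp hxmem
          exact reqOf_ne_empty it x hit
      by_cases hNn : N = []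
      · simp only [hS, hnomes, hAne, hNn, ne_eq, not_false_eq_true, if_true, List.take_nil,
          List.map_nil, not_true_eq_false, if_false, List.singleton_append, List.cons_append,
          List.nil_append]
        rw [join_two]
        simp only [String.append_assoc, lit1]
      · simp only [hS, hnomes, hAne, hNn, ne_eq, not_false_eq_true, if_true, not_true_eq_false,
          List.map_eq_nil_iff, List.take_eq_nil_iff, or_false, OfNat.ofNat_ne_zero, false_or,
          if_false, List.singleton_append, List.cons_append, List.nil_append]
        rw [join_three]
        simp only [String.append_assoc, lit1, lit2]
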